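-- pv_equiv track=rewrite | github.com/aiden-boyce/Advent-of-Code-2023 | day_two.py | is_valid_game
-- ===== SOURCE A (Python) =====
-- def compare_pulled_to_max(num, color):
--     max_red = 12
--     max_green = 13
--     max_blue = 14
--
--     if color == 'r':
--         return num <= max_red
--     if color == 'g':
--         return num <= max_green
--     if color == 'b':
--         return num <= max_blue
--
-- def get_num_color(line, digit_index):
--     line = line[digit_index:]
--     space_index = 0
--     for i, elem in enumerate(line):
--         if elem == ' ':
--             space_index = i
--             break
--     num = line[:space_index]
--     num = int(num)
--     color = line[space_index+1]
--     space_index = digit_index + space_index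
--     return num, color, space_index
--
-- def is_valid_game(line):
--     line = line[line.index(':'):]
--     is_valid = True
--     i = 0
--     while i < len(line):
--         if line[i].isdigit():
--             num, color, space_index = get_num_color(line, i)
--             is_valid = compare_pulled_to_max(num, color)
--             i = space_index
--         if not is_valid:
--             return is_valid
--         i += 1
--     return is_valid
-- ===== SOURCE B (Python) =====
-- def is_valid_game(line):
--     # different decomposition: split the segment after ':' into space-separated
--     # pieces and judge each adjacent (piece, next piece) pair: a piece ending in
--     # a digit run is a count whose color is the first letter of the next piece.
--     maxima = {'r': 12, 'g': 13, 'b': 14}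
--     parts = line[line.index(':'):].split(' ')
--     for left, right in zip(parts, parts[1:]):
--         num = ''
--         for ch in reversed(left):
--             if ch.isdigit():
--                 num = ch + num
--             else:
--                 break
--         if num and int(num) > maxima.get(right[:1], 0):
--             return False
--     return True
-- ===== Notes on version B (the rewrite author's own statement) =====
-- stated objective: alternative
-- what changed: A scans the segment character by character with index jumps computed by a helper; B splits the segment on spaces once and judges each adjacent (word, next word) pair, reading the count as the word's trailing digit run and the color as the next word's first letter.
-- outside the precondition, e.g. on is_valid_game(':3 x'): A returns None, B returns False; on is_valid_game(':99 r 5'): A returns False, B returns False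
import Mathlib
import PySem

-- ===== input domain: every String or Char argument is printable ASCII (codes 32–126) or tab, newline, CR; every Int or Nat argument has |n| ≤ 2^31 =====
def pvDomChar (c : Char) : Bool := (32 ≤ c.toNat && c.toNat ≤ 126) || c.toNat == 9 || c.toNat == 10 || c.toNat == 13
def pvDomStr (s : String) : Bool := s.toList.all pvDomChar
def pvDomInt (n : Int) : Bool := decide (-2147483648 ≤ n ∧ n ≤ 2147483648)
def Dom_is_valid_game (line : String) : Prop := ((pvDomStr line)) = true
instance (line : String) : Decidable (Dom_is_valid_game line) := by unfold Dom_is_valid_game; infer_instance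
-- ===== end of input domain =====

-- B replaces A's index-jumping scan by a split-on-space pass over adjacent word pairs (objective: simpler/alternative).

-- ===== PORT A =====

-- compare_pulled_to_max: Python returns True/False, or None for an unknown color (modelled as Option Bool)
def compare_pulled_to_max (num : Int) (color : Char) : Option Bool :=
  if color = 'r' then some (decide (num ≤ 12))
  else if color = 'g' then some (decide (num ≤ 13))
  else if color = 'b' then some (decide (num ≤ 14))
  else none

-- get_num_color: line[digit_index:], scan for the first ' ' (default 0), int(...) and line[space_index+1];
-- the int() ValueError / IndexError raising inputs are excluded by Pre_, so .getD defaults are never reached there.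
def get_num_color (s : List Char) (digitIndex : Nat) : Int × Char × Nat :=
  let t := s.drop digitIndex
  let spaceIndex := (PySem.List.index? t ' ').getD 0
  let num := (PySem.Int.ofChars? (t.take spaceIndex)).getD 0
  let color := t.getD (spaceIndex + 1) ' '
  (num, color, digitIndex + spaceIndex)

theorem get_num_color_third_ge (s : List Char) (i : Nat) : i ≤ (get_num_color s i).2.2 := by
  simp [get_num_color]

-- the while loop of is_valid_game; is_valid is True at every loop head, so the state is just i.
-- compare = none is Python's `return None` (not a bool), excluded by Pre_; modelled as false.
def loopA (s : List Char) (i : Nat) : Bool :=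
  if h : i < s.length then
    if PySem.Chars.isdigit s[i] then
      let r := get_num_color s i
      match compare_pulled_to_max r.1 r.2.1 with
      | some true => loopA s (r.2.2 + 1)
      | some false => false
      | none => false
    else loopA s (i + 1)
  else true
termination_by s.length - i
decreasing_by
  · have := get_num_color_third_ge s i; omega
  · omega

def is_valid_game (line : String) : Bool :=
  let cs := line.toList
  -- line.index(':'): raises ValueError when ':' is absent (excluded by Pre_), hence the .getD 0
  let idx := (PySem.List.index? cs ':').getD 0
  loopA (cs.drop idx) 0

-- ===== PORT B =====

-- Source B inner loop: num = ''; for ch in reversed(left): if ch.isdigit(): num = ch + num else break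
def bTrailingNum (left : List Char) : List Char :=
  ((left.reverse).takeWhile PySem.Chars.isdigit).reverse

def bMaxima : PySem.Dict (List Char) Int :=
  ((PySem.Dict.empty.insert ['r'] 12).insert ['g'] 13).insert ['b'] 14

-- the for loop over zip(parts, parts[1:]) with its early `return False`.
-- num is a (possibly empty) run of digits, so int(num) on a nonempty num never raises: .getD 0 is never reached.
def bCheck : List (List Char × List Char) → Bool
  | [] => true
  | (left, right) :: rest =>
    let num := bTrailingNum left
    if !num.isEmpty && decide (bMaxima.getD (right.take 1) 0 < (PySem.Int.ofChars? num).getD 0) then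
      false
    else bCheck rest

def is_valid_game_alt (line : String) : Bool :=
  let cs := line.toList
  -- line.index(':') as in A (ValueError outside Pre_)
  let idx := (PySem.List.index? cs ':').getD 0
  -- segment.split(' '): a single-character separator split is List.splitOn ' '
  let parts := (cs.drop idx).splitOn ' '
  bCheck (parts.zip (parts.drop 1))

-- ===== PRECONDITION & SPEC =====

-- shape grammar of the segment after ':' (a 3-state scanner, structural so that `decide` evaluates it):
-- state 0 = normal text, 1 = inside/right after a digit run, 2 = expecting a color letter;
-- it accepts exactly when every maximal digit run is followed by a space and then r/g/b.
def goodSt : List Char → Nat → Bool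
  | [], st => st == 0
  | c :: cs, st =>
    if st == 2 then (c == 'r' || c == 'g' || c == 'b') && goodSt cs 0
    else if PySem.Chars.isdigit c then goodSt cs 1
    else if st == 1 then (c == ' ') && goodSt cs 2
    else goodSt cs 0

def goodPulls (s : List Char) : Bool := goodSt s 0

-- Pre_ excludes lines without ':' and lines whose segment after ':' has a malformed or unknown-color pull
-- token anywhere: there A raises ValueError/IndexError or returns None (not a bool), and after a failing
-- token A stops scanning, so it can also return False on a line whose later tail is malformed.
def Pre_is_valid_game (line : String) : Prop :=
  ':' ∈ line.toList ∧ goodPulls (line.toList.dropWhile (fun c => c != ':')) = true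

instance (line : String) : Decidable (Pre_is_valid_game line) := by
  unfold Pre_is_valid_game; infer_instance

def pvWitness_is_valid_game : String := "Game 1: 3 b, 4 r; 5 g"

def Spec_is_valid_game (line : String) (out : Bool) : Prop := out = is_valid_game_alt line

instance (line : String) (out : Bool) : Decidable (Spec_is_valid_game line out) := by
  unfold Spec_is_valid_game; infer_instance

-- ===== CLAIM =====

def Claim_equal_is_valid_game : Prop :=
  ∀ (line : String), Dom_is_valid_game line → Pre_is_valid_game line →
    Spec_is_valid_game line (is_valid_game line)

-- ===== LEMMAS AND PROOFS =====

def bEval (s : List Char) : Bool :=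
  let parts := s.splitOn ' '
  bCheck (parts.zip (parts.drop 1))

-- small positional helpers
theorem getElem_of_drop_cons {s : List Char} {i : Nat} {c : Char} {cs : List Char}
    (h : i < s.length) (hd : s.drop i = c :: cs) : s[i]'h = c := by
  have h2 : (s.drop i)[0]? = some c := by rw [hd]; rfl
  rw [List.getElem?_drop, Nat.add_zero, List.getElem?_eq_getElem h] at h2
  exact Option.some.inj h2

theorem drop_add_of_drop_eq {s t : List Char} {i : Nat} (k : Nat) (hd : s.drop i = t) :
    s.drop (i + k) = t.drop k := by
  rw [← hd, List.drop_drop]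

theorem drop_append_cons (run u : List Char) (x : Char) :
    (run ++ x :: u).drop (run.length + 1) = u := by
  rw [show run ++ x :: u = (run ++ [x]) ++ u by simp,
    show run.length + 1 = (run ++ [x]).length by simp, List.drop_left]

-- goodPulls equations / elimination
theorem goodPulls_cons_nondigit (c : Char) (cs : List Char)
    (hd : PySem.Chars.isdigit c = false) : goodPulls (c :: cs) = goodPulls cs := by
  simp [goodPulls, goodSt, hd]

theorem goodSt_one_elim : ∀ (cs : List Char), goodSt cs 1 = true →
    ∃ col rest, cs.dropWhile PySem.Chars.isdigit = ' ' :: col :: rest ∧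
      (col == 'r' || col == 'g' || col == 'b') = true ∧ goodSt rest 0 = true := by
  intro cs
  induction cs with
  | nil => intro hg; simp [goodSt] at hg
  | cons c cs' ih =>
    intro hg
    by_cases hdd : PySem.Chars.isdigit c = true
    · rw [show goodSt (c :: cs') 1 = goodSt cs' 1 from by simp [goodSt, hdd]] at hg
      obtain ⟨col, rest, h1, h2, h3⟩ := ih hg
      exact ⟨col, rest, by simp [hdd, h1], h2, h3⟩
    · have hdd' : PySem.Chars.isdigit c = false := by simpa using hdd
      by_cases hsp : c = ' '
      · subst hsp
        rw [show goodSt (' ' :: cs') 1 = goodSt cs' 2 from by simp [goodSt, hdd']] at hg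
        rcases cs' with _ | ⟨col, rest⟩
        · simp [goodSt] at hg
        · have hband : ((col == 'r' || col == 'g' || col == 'b') && goodSt rest 0) = true := by
            simpa [goodSt] using hg
          obtain ⟨h2, h3⟩ : (col == 'r' || col == 'g' || col == 'b') = true ∧ goodSt rest 0 = true :=
            (Bool.and_eq_true _ _) ▸ hband
          exact ⟨col, rest, by simp [hdd'], h2, h3⟩
      · exfalso
        rw [show goodSt (c :: cs') 1 = ((c == ' ') && goodSt cs' 2) from by
          simp [goodSt, hdd']] at hg
        simp [hsp] at hg

theorem goodPulls_digit_elim (cs : List Char) (c : Char)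
    (hd : PySem.Chars.isdigit c = true) (hg : goodPulls (c :: cs) = true) :
    ∃ col rest, cs.dropWhile PySem.Chars.isdigit = ' ' :: col :: rest ∧
      (col == 'r' || col == 'g' || col == 'b') = true ∧ goodPulls rest = true := by
  have hg1 : goodSt cs 1 = true := by
    have h0 := hg
    simp [goodPulls, goodSt, hd] at h0
    exact h0
  exact goodSt_one_elim cs hg1

-- splitOn facts
theorem splitOn_surj (l : List Char) : ∃ q qs, l.splitOn ' ' = q :: qs := by
  rcases h : l.splitOn ' ' with _ | ⟨q, qs⟩
  · exact absurd h (List.splitOnP_ne_nil _ l)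
  · exact ⟨q, qs, rfl⟩

theorem splitOn_cons_space (l : List Char) : (' ' :: l).splitOn ' ' = [] :: l.splitOn ' ' := by
  simp [List.splitOn, List.splitOnP_cons]

theorem splitOn_cons_ne (c : Char) (l : List Char) (h : (c = ' ') → False) :
    (c :: l).splitOn ' ' = (l.splitOn ' ').modifyHead (List.cons c) := by
  have hc : (c == ' ') = false := by simpa using h
  simp [List.splitOn, List.splitOnP_cons, hc]

theorem splitOn_run (run suf : List Char) (hrun : ' ' ∉ run) :
    (run ++ ' ' :: suf).splitOn ' ' = run :: suf.splitOn ' ' := by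
  induction run with
  | nil => simpa using splitOn_cons_space suf
  | cons r rs ih =>
    have hr : (r = ' ') → False := fun h => hrun (by simp [h])
    have ih' := ih (fun h => hrun (List.mem_cons_of_mem _ h))
    rw [List.cons_append, splitOn_cons_ne r _ hr, ih']
    rfl

-- bTrailingNum facts
theorem bTrail_all_digits (run : List Char) (hall : ∀ x ∈ run, PySem.Chars.isdigit x = true) :
    bTrailingNum run = run := by
  unfold bTrailingNum
  rw [List.takeWhile_eq_self_iff.mpr (by intro x hx; exact hall x (by simpa using hx))]
  simp

theorem bTrail_cons_nondigit (c : Char) (l : List Char)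
    (hd : PySem.Chars.isdigit c = false) : bTrailingNum (c :: l) = bTrailingNum l := by
  unfold bTrailingNum
  rw [List.reverse_cons, List.takeWhile_append]
  split
  · next hl =>
      have : l.reverse.takeWhile PySem.Chars.isdigit = l.reverse :=
        (List.takeWhile_prefix _).eq_of_length hl
      simp [hd, this]
  · rfl

theorem bCheck_cons_congr (l l' r : List Char) (rest : List (List Char × List Char))
    (h : bTrailingNum l = bTrailingNum l') :
    bCheck ((l, r) :: rest) = bCheck ((l', r) :: rest) := by
  simp only [bCheck, h]

-- bEval step lemmas
theorem bEval_nil : bEval [] = true := rfl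

theorem bEval_cons_space (l : List Char) : bEval (' ' :: l) = bEval l := by
  obtain ⟨q, qs, hq⟩ := splitOn_surj l
  unfold bEval
  rw [splitOn_cons_space, hq]
  simp [bCheck, bTrailingNum]

theorem bEval_cons_nondigit (c : Char) (l : List Char)
    (hd : PySem.Chars.isdigit c = false) (hs : (c = ' ') → False) :
    bEval (c :: l) = bEval l := by
  obtain ⟨q, qs, hq⟩ := splitOn_surj l
  unfold bEval
  rw [splitOn_cons_ne c l hs, hq]
  simp only [List.modifyHead]
  cases qs with
  | nil => rfl
  | cons q1 qs' =>
    have hz1 : ((c :: q) :: q1 :: qs').zip (((c :: q) :: q1 :: qs').drop 1)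
        = ((c :: q), q1) :: ((q1 :: qs').zip qs') := rfl
    have hz2 : (q :: q1 :: qs').zip ((q :: q1 :: qs').drop 1)
        = (q, q1) :: ((q1 :: qs').zip qs') := rfl
    rw [hz1, hz2, bCheck_cons_congr _ _ _ _ (bTrail_cons_nondigit c q hd)]

theorem bEval_block (run : List Char) (col : Char) (rest : List Char)
    (hne : run ≠ []) (hall : ∀ x ∈ run, PySem.Chars.isdigit x = true)
    (hcs : (col = ' ') → False) (hcold : PySem.Chars.isdigit col = false) :
    bEval (run ++ ' ' :: col :: rest) =
      (if bMaxima.getD [col] 0 < (PySem.Int.ofChars? run).getD 0 then false else bEval rest) := by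
  have hrun : ' ' ∉ run := fun hm => by have := hall _ hm; simp [PySem.Chars.isdigit] at this
  obtain ⟨q, qs, hq⟩ := splitOn_surj rest
  unfold bEval
  rw [splitOn_run run _ hrun, splitOn_cons_ne col rest hcs, hq]
  simp only [List.modifyHead]
  have hpairs : (run :: (col :: q) :: qs).zip ((run :: (col :: q) :: qs).drop 1)
      = (run, col :: q) :: (((col :: q) :: qs).zip qs) := rfl
  rw [hpairs]
  simp only [bCheck]
  rw [bTrail_all_digits run hall]
  have hnei : run.isEmpty = false := by cases run <;> simp_all
  have htake : (col :: q).take 1 = [col] := rfl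
  rw [htake, hnei]
  simp only [Bool.not_false, Bool.true_and]
  have hrest : bCheck (((col :: q) :: qs).zip qs) = bCheck ((q :: qs).zip qs) := by
    have e1 : bCheck (((col :: q) :: qs).zip qs) = bEval (col :: rest) := by
      unfold bEval
      rw [splitOn_cons_ne col rest hcs, hq]
      rfl
    have e2 : bCheck ((q :: qs).zip qs) = bEval rest := by
      unfold bEval
      rw [hq]
      rfl
    rw [e1, e2, bEval_cons_nondigit col rest hcold hcs]
  by_cases hm : bMaxima.getD [col] 0 < (PySem.Int.ofChars? run).getD 0
  · simp [hm]
  · simp [hm, hrest]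

-- loopA step lemmas
theorem loopA_ge (s : List Char) (i : Nat) (h : ¬ i < s.length) : loopA s i = true := by
  rw [loopA]; simp [h]

theorem loopA_nondigit (s : List Char) (i : Nat) (h : i < s.length)
    (hd : PySem.Chars.isdigit (s[i]'h) = false) : loopA s i = loopA s (i + 1) := by
  conv_lhs => rw [loopA]
  simp [h, hd]

theorem loopA_digit_block (s : List Char) (i : Nat) (run : List Char) (col : Char)
    (rest : List Char) (h : i < s.length) (ht : s.drop i = run ++ ' ' :: col :: rest)
    (hne : run ≠ []) (hall : ∀ x ∈ run, PySem.Chars.isdigit x = true)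
    (hcol : (col == 'r' || col == 'g' || col == 'b') = true) :
    loopA s i = (if (PySem.Int.ofChars? run).getD 0 ≤ bMaxima.getD [col] 0
                 then loopA s (i + run.length + 1) else false) := by
  have hrun : ' ' ∉ run := fun hm => by have := hall _ hm; simp [PySem.Chars.isdigit] at this
  have hd : PySem.Chars.isdigit (s[i]'h) = true := by
    rcases run with _ | ⟨r, rs⟩
    · exact absurd rfl hne
    · rw [getElem_of_drop_cons h (by rw [ht]; rfl)]
      exact hall r (by simp)
  rw [loopA]
  rw [dif_pos h, if_pos hd]
  have hidx : PySem.List.index? (s.drop i) ' ' = some run.length := by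
    rw [PySem.List.index?_eq_some_iff]
    exact ⟨run, col :: rest, ht, rfl, hrun⟩
  have htake : (s.drop i).take run.length = run := by rw [ht]; exact List.take_left
  have hgetD : (s.drop i).getD (run.length + 1) ' ' = col := by
    rw [ht, show run ++ ' ' :: col :: rest = (run ++ [' ']) ++ col :: rest by simp]
    rw [List.getD_eq_getElem?_getD, List.getElem?_append_right (by simp)]
    simp
  have hcmp : compare_pulled_to_max ((PySem.Int.ofChars? run).getD 0) col
      = some (decide ((PySem.Int.ofChars? run).getD 0 ≤ bMaxima.getD [col] 0)) := by
    have hc3 : col = 'r' ∨ col = 'g' ∨ col = 'b' := by simpa [or_assoc] using hcol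
    rcases hc3 with h' | h' | h' <;> subst h' <;> rfl
  simp only [get_num_color, hidx, Option.getD_some, htake, hgetD, hcmp]
  by_cases hle : (PySem.Int.ofChars? run).getD 0 ≤ bMaxima.getD [col] 0
  · simp [hle, Nat.add_assoc]
  · simp [hle]

-- the main induction: A's index loop equals B's pair scan on every goodPulls suffix
theorem main_lemma (n : Nat) : ∀ (s : List Char) (i : Nat), s.length - i ≤ n →
    goodPulls (s.drop i) = true → loopA s i = bEval (s.drop i) := by
  induction n with
  | zero =>
    intro s i hle hg
    rw [List.drop_eq_nil_iff.mpr (by omega), loopA_ge s i (by omega), bEval_nil]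
  | succ n ih =>
    intro s i hle hg
    by_cases h : i < s.length
    · rcases ht : s.drop i with _ | ⟨c, cs'⟩
      · have hld : (s.drop i).length = s.length - i := by simp
        rw [ht] at hld; simp at hld; omega
      · have hci : s[i]'h = c := getElem_of_drop_cons h ht
        have hcs' : s.drop (i + 1) = cs' := by
          rw [drop_add_of_drop_eq 1 ht]; rfl
        rw [ht] at hg
        by_cases hd : PySem.Chars.isdigit c = true
        · -- a pull token starts here
          obtain ⟨col, rest, hdw, hcol, hgrest⟩ := goodPulls_digit_elim cs' c hd hg
          set run : List Char := c :: cs'.takeWhile PySem.Chars.isdigit with hrundef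
          have hsplit : c :: cs' = run ++ ' ' :: col :: rest := by
            rw [hrundef, List.cons_append]
            congr 1
            rw [← hdw]
            exact (List.takeWhile_append_dropWhile).symm
          have hall : ∀ x ∈ run, PySem.Chars.isdigit x = true := by
            intro x hx
            rcases List.mem_cons.mp hx with h' | h'
            · subst h'; exact hd
            · exact List.mem_takeWhile_imp h'
          have hc3 : col = 'r' ∨ col = 'g' ∨ col = 'b' := by simpa [or_assoc] using hcol
          have hcold : PySem.Chars.isdigit col = false := by
            rcases hc3 with h' | h' | h' <;> subst h' <;> rfl
          have hcspace : (col = ' ') → False := by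
            rcases hc3 with h' | h' | h' <;> subst h' <;> simp
          have ht' : s.drop i = run ++ ' ' :: col :: rest := by rw [ht, hsplit]
          have hld : (s.drop i).length = s.length - i := by simp
          have hlen : s.length - i = run.length + 2 + rest.length := by
            rw [← hld, ht']; simp; omega
          rw [loopA_digit_block s i run col rest h ht' (by simp [hrundef]) hall hcol]
          rw [hsplit, bEval_block run col rest (by simp [hrundef]) hall hcspace hcold]
          by_cases hle' : (PySem.Int.ofChars? run).getD 0 ≤ bMaxima.getD [col] 0
          · rw [if_pos hle', if_neg (by omega)]
            have hlt1 : i + run.length + 1 < s.length := by omega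
            have hdrop1 : s.drop (i + run.length + 1) = col :: rest := by
              rw [show i + run.length + 1 = i + (run.length + 1) by omega,
                drop_add_of_drop_eq (run.length + 1) ht', drop_append_cons]
            rw [loopA_nondigit s (i + run.length + 1) hlt1
              (by rw [getElem_of_drop_cons hlt1 hdrop1]; exact hcold)]
            have hdrop2 : s.drop (i + run.length + 1 + 1) = rest := by
              rw [drop_add_of_drop_eq 1 hdrop1]; rfl
            have hih := ih s (i + run.length + 1 + 1) (by omega)
              (by rw [hdrop2]; exact hgrest)
            rw [hih, hdrop2]
          · rw [if_neg hle', if_pos (by omega)]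
        · -- not a digit: skip one character
          have hd' : PySem.Chars.isdigit c = false := by simpa using hd
          have hg' : goodPulls cs' = true := by
            rw [goodPulls_cons_nondigit c cs' hd'] at hg; exact hg
          have hih := ih s (i + 1) (by omega) (by rw [hcs']; exact hg')
          rw [loopA_nondigit s i h (by rw [hci]; exact hd'), hih, hcs']
          by_cases hsp : c = ' '
          · subst hsp; exact (bEval_cons_space cs').symm
          · exact (bEval_cons_nondigit c cs' hd' (fun h' => hsp h')).symm
    · rw [List.drop_eq_nil_iff.mpr (by omega), loopA_ge s i h, bEval_nil]

theorem drop_index_colon (cs : List Char) (h : ':' ∈ cs) :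
    cs.drop ((PySem.List.index? cs ':').getD 0) = cs.dropWhile (fun c => c != ':') := by
  obtain ⟨k, hk⟩ := Option.isSome_iff_exists.mp ((PySem.List.index?_isSome_iff cs ':').mpr h)
  obtain ⟨pre, suf, hsplit, hlen, hnot⟩ := (PySem.List.index?_eq_some_iff cs ':' k).mp hk
  rw [hk, Option.getD_some, hsplit, ← hlen, List.drop_left]
  rw [List.dropWhile_append]
  have hpre : pre.dropWhile (fun c => c != ':') = [] := by
    rw [List.dropWhile_eq_nil_iff]
    intro x hx
    simp only [bne_iff_ne, ne_eq]
    intro hx'; exact hnot (hx' ▸ hx)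
  rw [hpre]
  simp

-- ===== VERDICT =====

theorem is_valid_game_spec : Claim_equal_is_valid_game := by
  intro line _dom hpre
  obtain ⟨hmem, hgood⟩ := hpre
  simp only [Spec_is_valid_game, is_valid_game, is_valid_game_alt]
  rw [drop_index_colon _ hmem]
  have hmain := main_lemma (line.toList.dropWhile (fun c => c != ':')).length
    (line.toList.dropWhile (fun c => c != ':')) 0 (by omega) (by simpa using hgood)
  simpa [bEval] using hmain
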